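-- pv_equiv track=rewrite | github.com/ywjneu/GraphCGC-Net | MGC/retrain.py | get_key
-- ===== SOURCE A (Python) =====
-- def get_key(file_name):
--     file_name = file_name.split('_')
--     key = ''
--     for i in range(len(file_name)):
--         if file_name[i] == 'rois':
--             key = key[:-1]
--             break
--         else:
--             key += file_name[i]
--             key += '_'
--     return key
-- ===== SOURCE B (Python) =====
-- def get_key(file_name):
--     tokens = file_name.split('_')
--     if 'rois' in tokens:
--         return '_'.join(tokens[:tokens.index('rois')])
--     return '_'.join(tokens) + '_'
-- ===== Notes on version B (the rewrite author's own statement) =====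
-- stated objective: simpler
-- what changed: Replaced A's incremental accumulate-then-strip loop with a find-then-slice-then-join decomposition: locate the marker token with index(), slice the tokens before it and join once, appending the trailing separator only in the not-found case.
import Mathlib
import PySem

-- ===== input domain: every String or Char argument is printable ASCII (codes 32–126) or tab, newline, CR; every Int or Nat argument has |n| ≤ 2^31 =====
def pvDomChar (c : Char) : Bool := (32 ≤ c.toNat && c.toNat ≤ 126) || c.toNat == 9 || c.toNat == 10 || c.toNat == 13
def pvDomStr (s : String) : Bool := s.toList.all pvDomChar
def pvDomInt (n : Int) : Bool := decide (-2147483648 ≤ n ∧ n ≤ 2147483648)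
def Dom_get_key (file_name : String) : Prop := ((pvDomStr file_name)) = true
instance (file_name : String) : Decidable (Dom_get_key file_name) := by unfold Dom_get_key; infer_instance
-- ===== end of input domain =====

-- B replaces A's accumulate-then-strip loop by a find-then-slice-then-join decomposition (objective: simpler).

-- ===== PORT A =====
-- the for-loop with break: fold over the split tokens, building key; 'rois' stops and strips the last '_'
def getKeyLoopA : List (List Char) → List Char → List Char
  | [], key => key
  | t :: ts, key =>
    if t = "rois".toList then PySem.List.slice key none (some (-1))
    else getKeyLoopA ts (key ++ t ++ ['_'])

def get_key (file_name : String) : String :=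
  String.mk (getKeyLoopA (PySem.Chars.splitOn file_name.toList ['_']) [])

-- ===== PORT B =====
def get_key_alt (file_name : String) : String :=
  let tokens := PySem.Chars.splitOn file_name.toList ['_']
  String.mk
    (match PySem.List.index? tokens "rois".toList with
     | some i => PySem.Chars.join ['_'] (PySem.List.slice tokens none (some (i : Int)))
     | none => PySem.Chars.join ['_'] tokens ++ ['_'])

-- ===== PRECONDITION & SPEC =====
def Spec_get_key (file_name : String) (out : String) : Prop := out = get_key_alt file_name
instance (file_name : String) (out : String) : Decidable (Spec_get_key file_name out) := by unfold Spec_get_key; infer_instance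

-- ===== CLAIM (what is proved, stated in full; the proofs are below) =====
def Claim_equal_get_key : Prop := ∀ (file_name : String), Dom_get_key file_name → Spec_get_key file_name (get_key file_name)

-- ===== LEMMAS AND PROOFS =====

-- each token followed by '_' (what A's accumulator builds)
def sepA (ts : List (List Char)) : List Char := ts.flatMap (· ++ ['_'])

lemma sepA_cons (t : List Char) (ts : List (List Char)) :
    sepA (t :: ts) = t ++ ['_'] ++ sepA ts := by
  simp [sepA]

lemma join_append_underscore (t : List Char) (ts : List (List Char)) :
    PySem.Chars.join ['_'] (t :: ts) ++ ['_'] = sepA (t :: ts) := by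
  induction ts generalizing t with
  | nil => simp [PySem.Chars.join_singleton, sepA]
  | cons u us ih =>
      rw [PySem.Chars.join_cons_cons, sepA_cons, ← ih u]
      simp

lemma dropLast_sepA (ts : List (List Char)) :
    (sepA ts).dropLast = PySem.Chars.join ['_'] ts := by
  cases ts with
  | nil => simp [sepA, PySem.Chars.join_nil]
  | cons t us =>
      rw [← join_append_underscore t us]
      simp

lemma getKeyLoopA_eq (ts : List (List Char)) :
    ∀ key, getKeyLoopA ts key =
      match PySem.List.index? ts "rois".toList with
      | some i => (key ++ sepA (ts.take i)).dropLast
      | none => key ++ sepA ts := by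
  induction ts with
  | nil => intro key; simp [getKeyLoopA, PySem.List.index?, sepA]
  | cons t us ih =>
      intro key
      by_cases h : t = "rois".toList
      · subst h
        rw [PySem.List.index?_cons_self]
        simp [getKeyLoopA, PySem.List.slice_to_neg_one, sepA]
      · rw [PySem.List.index?_cons_of_ne _ h]
        simp only [getKeyLoopA, if_neg h, ih]
        cases hix : PySem.List.index? us "rois".toList with
        | none => simp [sepA_cons]
        | some i => simp [sepA_cons]

lemma splitOn_go_ne_nil (sep : List Char) :
    ∀ (fuel : Nat) (l cur : List Char) (acc : List (List Char)),
      PySem.Chars.splitOn.go sep fuel l cur acc ≠ [] := by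
  intro fuel
  induction fuel with
  | zero => intro l cur acc; simp [PySem.Chars.splitOn.go]
  | succ n ih =>
      intro l cur acc
      cases l with
      | nil => simp [PySem.Chars.splitOn.go]
      | cons c rest =>
          rw [PySem.Chars.splitOn.go]
          split
          · exact ih _ _ _
          · exact ih _ _ _

lemma splitOn_ne_nil (s sep : List Char) : PySem.Chars.splitOn s sep ≠ [] := by
  unfold PySem.Chars.splitOn
  exact splitOn_go_ne_nil sep _ _ _ _

-- ===== VERDICT (by name: the statement is the Claim_ definition above) =====
theorem get_key_spec : Claim_equal_get_key := by
  intro file_name _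
  unfold Spec_get_key get_key get_key_alt
  rw [getKeyLoopA_eq]
  cases hts : PySem.Chars.splitOn file_name.toList ['_'] with
  | nil => exact absurd hts (splitOn_ne_nil _ _)
  | cons t us =>
      cases hix : PySem.List.index? (t :: us) "rois".toList with
      | some i =>
          simp only [hix, List.nil_append, PySem.List.slice_to_natCast, dropLast_sepA]
      | none =>
          simp only [hix, List.nil_append, join_append_underscore]
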